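-- pv_equiv track=rewrite | github.com/esparta/datos_inegi | scripts/todatabase.py | genvalues
-- ===== SOURCE A (Python) =====
-- def genvalues(columns, iterator, limit=50000):
--     """ Given an iterator, return a list of dictionaries
--         mixing the columns with the iterator values """
--     results = []
--     for num_rows, row in enumerate(iterator, start=1):
--         results.append(dict(zip(columns, row)))
--         if num_rows % limit == 0:
--             yield results
--             results = []
--     yield results
-- ===== SOURCE B (Python) =====
-- import itertools
--
-- def genvalues(columns, iterator, limit=50000):
--     """ Given an iterator, return a list of dictionaries
--         mixing the columns with the iterator values """
--     it = iter(iterator)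
--     while True:
--         chunk = list(itertools.islice(it, limit))
--         yield [dict(zip(columns, row)) for row in chunk]
--         if len(chunk) < limit:
--             break
-- ===== Notes on version B (the rewrite author's own statement) =====
-- stated objective: idiomatic
-- what changed: Replaces the running enumerate counter with a modulo test and a growing accumulator by repeatedly slicing fixed-size chunks off the iterator with itertools.islice.
-- outside the precondition, e.g. on genvalues(['a'], [['x'], ['y']], -1): A returns [[{'a': 'x'}], [{'a': 'y'}], []], B raises ValueError; on genvalues(['a'], [['x']], 0): A raises ZeroDivisionError, B does not finish within the time limit
import Mathlib
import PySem

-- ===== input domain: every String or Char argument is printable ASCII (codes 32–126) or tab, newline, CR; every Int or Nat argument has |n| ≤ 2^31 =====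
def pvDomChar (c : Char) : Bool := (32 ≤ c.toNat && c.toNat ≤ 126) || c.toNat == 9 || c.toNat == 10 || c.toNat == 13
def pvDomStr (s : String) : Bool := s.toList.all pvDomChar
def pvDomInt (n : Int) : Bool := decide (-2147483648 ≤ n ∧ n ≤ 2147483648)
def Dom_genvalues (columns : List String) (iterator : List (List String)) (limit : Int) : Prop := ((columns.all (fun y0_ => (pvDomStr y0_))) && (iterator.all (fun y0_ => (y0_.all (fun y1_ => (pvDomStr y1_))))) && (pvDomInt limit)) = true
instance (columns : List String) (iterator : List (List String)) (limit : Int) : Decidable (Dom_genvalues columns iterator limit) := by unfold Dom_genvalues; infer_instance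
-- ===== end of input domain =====

-- B replaces A's running modulo counter and growing accumulator with repeated
-- fixed-size slicing off the front of the iterator (itertools.islice chunker): idiomatic, same cost.

-- ===== PORT A =====
-- dict(zip(columns, row)), shared by both ports (the same library expression in both Pythons)
def pvDictZip (columns row : List String) : List (String × String) :=
  (PySem.Dict.ofList (columns.zip row)).items

-- the generator loop of A: counter n (Python's num_rows), accumulator results
def genvaluesAux (columns : List String) (limit : Int) :
    List (List String) → Int → List (List (String × String)) → List (List (List (String × String)))
  | [], _, results => [results]
  | row :: rest, n, results =>
      let results' := results ++ [pvDictZip columns row]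
      if PySem.Int.mod n limit == 0 then
        results' :: genvaluesAux columns limit rest (n + 1) []
      else
        genvaluesAux columns limit rest (n + 1) results'

def genvalues (columns : List String) (iterator : List (List String)) (limit : Int) :
    List (List (List (String × String))) :=
  genvaluesAux columns limit iterator 1 []

-- ===== PORT B =====
-- B's while-True loop: take a chunk of `limit` rows, yield its dicts, stop on a short chunk.
-- `fuel` only makes the recursion structurally total; iterator.length + 1 iterations always
-- suffice when limit ≥ 1 (each full chunk consumes ≥ 1 row).
def genvaluesAltAux (columns : List String) (k : Nat) :
    Nat → List (List String) → List (List (List (String × String)))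
  | 0, _ => []
  | fuel + 1, it =>
      let chunk := it.take k
      let batch := chunk.map (pvDictZip columns)
      if chunk.length < k then [batch]
      else batch :: genvaluesAltAux columns k fuel (it.drop k)

def genvalues_alt (columns : List String) (iterator : List (List String)) (limit : Int) :
    List (List (List (String × String))) :=
  genvaluesAltAux columns limit.toNat (iterator.length + 1) iterator

-- ===== PRECONDITION & SPEC =====
-- Pre_ excludes limit ≤ 0: at limit = 0 A raises ZeroDivisionError; for limit < 0 A returns
-- (Python's modulo accepts a negative divisor) but B's islice raises ValueError there.
def Pre_genvalues (columns : List String) (iterator : List (List String)) (limit : Int) : Prop :=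
  1 ≤ limit
instance (columns : List String) (iterator : List (List String)) (limit : Int) : Decidable (Pre_genvalues columns iterator limit) := by unfold Pre_genvalues; infer_instance

def pvWitness_genvalues : List String × List (List String) × Int :=
  (["a", "b"], [["x", "y"], ["u", "v"], ["p", "q"]], 2)

def Spec_genvalues (columns : List String) (iterator : List (List String)) (limit : Int) (out : List (List (List (String × String)))) : Prop := out = genvalues_alt columns iterator limit
instance (columns : List String) (iterator : List (List String)) (limit : Int) (out : List (List (List (String × String)))) : Decidable (Spec_genvalues columns iterator limit out) := by unfold Spec_genvalues; infer_instance

-- ===== CLAIM (what is proved, stated in full; the proofs are below) =====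
def Claim_equal_genvalues : Prop := ∀ (columns : List String) (iterator : List (List String)) (limit : Int), Dom_genvalues columns iterator limit → Pre_genvalues columns iterator limit → Spec_genvalues columns iterator limit (genvalues columns iterator limit)

-- ===== LEMMAS AND PROOFS =====

-- Common reference form: A's loop with the counter replaced by the remaining chunk capacity c.
def mergeSpec (columns : List String) (k : Nat) :
    List (List String) → Nat → List (List (String × String)) → List (List (List (String × String)))
  | [], _, r => [r]
  | row :: rest, c, r =>
      let r' := r ++ [pvDictZip columns row]
      if c ≤ 1 then r' :: mergeSpec columns k rest k []
      else mergeSpec columns k rest (c - 1) r'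

-- A's loop equals mergeSpec, with capacity (limit - (n-1) % limit).
lemma genvaluesAux_eq_mergeSpec (columns : List String) (limit : Int) (hl : 1 ≤ limit) :
    ∀ (it : List (List String)) (n : Int) (r : List (List (String × String))),
      genvaluesAux columns limit it n r =
        mergeSpec columns limit.toNat it (limit - (n - 1) % limit).toNat r := by
  intro it
  induction it with
  | nil => intro n r; rfl
  | cons row rest ih =>
    intro n r
    have hlne : limit ≠ 0 := by omega
    have hm0 : 0 ≤ (n - 1) % limit := Int.emod_nonneg _ hlne
    have hmlt : (n - 1) % limit < limit := Int.emod_lt_of_pos _ (by omega)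
    have hkey : n % limit = ((n - 1) % limit + 1) % limit := by
      have hdiv := Int.emod_add_mul_ediv (n - 1) limit
      have h2 : n - ((n - 1) % limit + 1) = (n - 1) / limit * limit := by linarith
      rw [Int.emod_eq_emod_iff_emod_sub_eq_zero, h2]
      exact Int.mul_emod_left _ _
    simp only [genvaluesAux, mergeSpec, PySem.Int.mod_eq_emod_of_pos (by omega : (0:Int) < limit)]
    by_cases hc : (n - 1) % limit = limit - 1
    · have hz : n % limit = 0 := by
        rw [hkey, hc]
        simp
      rw [hz]
      simp only [beq_self_eq_true, if_true]
      have h1 : (limit - (n - 1) % limit).toNat ≤ 1 := by omega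
      rw [if_pos h1, ih]
      have : n + 1 - 1 = n := by ring
      rw [this, hz]
      simp
    · have hnz : n % limit ≠ 0 := by
        rw [hkey, Int.emod_eq_of_lt (by omega) (by omega)]
        omega
      rw [if_neg (by simpa using hnz), ih]
      have hn1 : n + 1 - 1 = n := by ring
      rw [hn1, hkey, Int.emod_eq_of_lt (by omega) (by omega)]
      have hcap : ¬ (limit - (n - 1) % limit).toNat ≤ 1 := by omega
      rw [if_neg hcap]
      congr 1
      omega

-- Unrolling mergeSpec one whole chunk at a time.
lemma mergeSpec_unroll (columns : List String) (k : Nat) :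
    ∀ (it : List (List String)) (c : Nat) (r : List (List (String × String))), 1 ≤ c →
      mergeSpec columns k it c r =
        if it.length < c then [r ++ it.map (pvDictZip columns)]
        else (r ++ (it.take c).map (pvDictZip columns)) :: mergeSpec columns k (it.drop c) k [] := by
  intro it
  induction it with
  | nil =>
    intro c r hc
    simp only [mergeSpec, List.length_nil, List.map_nil, List.append_nil]
    rw [if_pos (by omega)]
  | cons row rest ih =>
    intro c r hc
    by_cases h1 : c ≤ 1
    · have hc1 : c = 1 := by omega
      subst hc1
      simp [mergeSpec, List.take_succ_cons, List.drop_succ_cons]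
    · simp only [mergeSpec, if_neg h1]
      rw [ih (c - 1) _ (by omega)]
      have hcs : ∃ c', c = c' + 1 ∧ 1 ≤ c' := ⟨c - 1, by omega⟩
      obtain ⟨c', rfl, _⟩ := hcs
      simp only [Nat.add_sub_cancel, List.length_cons, List.take_succ_cons, List.drop_succ_cons,
        List.map_cons]
      by_cases hlen : rest.length < c'
      · rw [if_pos hlen, if_pos (by omega)]
        simp
      · rw [if_neg hlen, if_neg (by omega)]
        simp

-- B's fueled loop equals mergeSpec with full capacity, given enough fuel.
lemma genvaluesAltAux_eq_mergeSpec (columns : List String) (k : Nat) (hk : 1 ≤ k) :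
    ∀ (fuel : Nat) (it : List (List String)), it.length + 1 ≤ fuel →
      genvaluesAltAux columns k fuel it = mergeSpec columns k it k [] := by
  intro fuel
  induction fuel with
  | zero => intro it h; omega
  | succ fuel ih =>
    intro it hfuel
    simp only [genvaluesAltAux]
    rw [mergeSpec_unroll columns k it k [] hk]
    by_cases hlen : it.length < k
    · rw [if_pos (by simp [List.length_take]; omega), if_pos hlen]
      rw [List.take_of_length_le (by omega)]
      simp
    · rw [if_neg (by simp [List.length_take]; omega), if_neg hlen]
      rw [ih (it.drop k) (by simp [List.length_drop]; omega)]
      simp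

-- ===== VERDICT (by name: the statement is the Claim_ definition above) =====
theorem genvalues_spec : Claim_equal_genvalues := by
  intro columns iterator limit _hdom hpre
  unfold Spec_genvalues genvalues genvalues_alt
  have hk : 1 ≤ limit.toNat := by unfold Pre_genvalues at hpre; omega
  rw [genvaluesAux_eq_mergeSpec columns limit hpre iterator 1 []]
  rw [genvaluesAltAux_eq_mergeSpec columns limit.toNat hk (iterator.length + 1) iterator (by omega)]
  congr 1
  simp
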